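-- pv_equiv track=rewrite | github.com/Arsen1302/Code-copy-detector | TestData/solutions/problem_448_5.py | solution_448_5
-- ===== SOURCE A (Python) =====
-- from typing import List
--
-- def solution_448_5(licensePlate: str, words: List[str]) -> str:
--
--     # Runtime: 64 ms, faster than 93.88%
--     # Memory Usage: 14.5 MB, less than 81.41%
--
--     words = sorted(words, key=len)  # Handle multiple shortest 'completing' words
--     lic = ''.join(sorted([x for x in licensePlate.lower() if 96 < ord(x) <= 122]))
--
--     for word in words:
--
--         buff = ''.join(word)
--         exists = True
--         for char in lic:
--             if char not in buff:
--                 exists = False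
--                 break
--             else:
--                 if buff.count(char) < lic.count(char):
--                     exists = False
--                     break
--         if exists:
--             return word
-- ===== SOURCE B (Python) =====
-- def solution_448_5(licensePlate, words):
--     # One pass over words keeping the first strictly-shortest match; letter needs kept as a counter dict.
--     need = {}
--     for ch in licensePlate.lower():
--         if 'a' <= ch <= 'z':
--             need[ch] = need.get(ch, 0) + 1
--     best = None
--     for w in words:
--         if all(w.count(c) >= k for c, k in need.items()):
--             if best is None or len(w) < len(best):
--                 best = w
--     return best
-- ===== Notes on version B (the rewrite author's own statement) =====
-- stated objective: faster
-- what changed: B replaces A's stable sort of words by length followed by a first-match scan with a single unsorted pass that keeps the first strictly-shortest completing word, and replaces A's sorted letter string (with a repeated lic.count scan per character) by a counter dict of the plate's letter needs checked once per distinct letter.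
import Mathlib
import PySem

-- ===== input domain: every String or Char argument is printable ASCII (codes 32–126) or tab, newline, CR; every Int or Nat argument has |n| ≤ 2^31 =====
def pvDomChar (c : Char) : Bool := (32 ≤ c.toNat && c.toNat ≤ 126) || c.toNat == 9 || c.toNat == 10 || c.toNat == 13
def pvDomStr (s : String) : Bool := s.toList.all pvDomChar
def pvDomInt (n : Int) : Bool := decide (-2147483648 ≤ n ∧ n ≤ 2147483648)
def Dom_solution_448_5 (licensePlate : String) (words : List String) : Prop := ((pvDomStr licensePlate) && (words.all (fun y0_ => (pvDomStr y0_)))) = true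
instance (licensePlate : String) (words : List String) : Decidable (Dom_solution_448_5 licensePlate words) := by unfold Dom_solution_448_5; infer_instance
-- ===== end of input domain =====

-- B drops A's sort of `words` and instead scans them once keeping the first strictly-shortest
-- completing word, with the plate's letter needs held as a counter dict (objective: alternative).

-- ===== PORT A =====
-- inner 'for char in lic' loop: break-with-flag as structural recursion over the remaining chars
def pvCheckA (lic buff : List Char) : List Char → Bool
  | [] => true
  | c :: rest =>
    if ¬ (buff.contains c) then false
    else if buff.count c < lic.count c then false
    else pvCheckA lic buff rest

-- outer 'for word in words' loop with the early 'return word'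
def pvLoopA (lic : List Char) : List String → Option String
  | [] => none
  | w :: ws => if pvCheckA lic w.toList lic then some w else pvLoopA lic ws

def solution_448_5 (licensePlate : String) (words : List String) : Option String :=
  let ws := PySem.List.sorted words (fun w => PySem.Str.len w)
  let lic := PySem.List.sorted
      (((PySem.Str.lower licensePlate).toList).filter
        (fun x => decide (96 < x.toNat) && decide (x.toNat ≤ 122)))
      (fun c => c)
  pvLoopA lic ws

-- ===== PORT B =====
def pvCheckB (need : PySem.Dict Char Int) (w : String) : Bool :=
  need.items.all (fun p => decide ((w.toList.count p.1 : Int) ≥ p.2))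

def pvBestStep (need : PySem.Dict Char Int) (best : Option String) (w : String) : Option String :=
  if pvCheckB need w then
    match best with
    | none => some w
    | some b => if PySem.Str.len w < PySem.Str.len b then some w else best
  else best

def solution_448_5_alt (licensePlate : String) (words : List String) : Option String :=
  let need := (((PySem.Str.lower licensePlate).toList).filter
      (fun ch => decide ('a' ≤ ch) && decide (ch ≤ 'z'))).foldl
      (fun d x => d.insert x (d.getD x 0 + 1)) PySem.Dict.empty
  words.foldl (pvBestStep need) none

-- ===== PRECONDITION & SPEC =====
def Spec_solution_448_5 (licensePlate : String) (words : List String) (out : Option String) : Prop := out = solution_448_5_alt licensePlate words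
instance (licensePlate : String) (words : List String) (out : Option String) : Decidable (Spec_solution_448_5 licensePlate words out) := by unfold Spec_solution_448_5; infer_instance

-- ===== CLAIM (what is proved, stated in full; the proofs are below) =====
def Claim_equal_solution_448_5 : Prop := ∀ (licensePlate : String) (words : List String), Dom_solution_448_5 licensePlate words → Spec_solution_448_5 licensePlate words (solution_448_5 licensePlate words)

-- ===== LEMMAS AND PROOFS =====

-- generic "first strictly-shortest match" step, with an arbitrary predicate
def pvStepG (p : String → Bool) (best : Option String) (w : String) : Option String :=
  if p w then
    match best with
    | none => some w
    | some b => if PySem.Str.len w < PySem.Str.len b then some w else best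
  else best

theorem pvLoopA_eq_find (lic : List Char) (l : List String) :
    pvLoopA lic l = l.find? (fun w => pvCheckA lic w.toList lic) := by
  induction l with
  | nil => rfl
  | cons w ws ih =>
    simp only [pvLoopA, List.find?]
    split_ifs with h
    · simp [h]
    · simp [h, ih]

theorem pvCheckA_iff (lic buff : List Char) (rest : List Char) :
    pvCheckA lic buff rest = true ↔
      ∀ c ∈ rest, buff.contains c = true ∧ lic.count c ≤ buff.count c := by
  induction rest with
  | nil => simp [pvCheckA]
  | cons c r ih =>
    simp only [pvCheckA]
    by_cases h1 : buff.contains c = true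
    · by_cases h2 : buff.count c < lic.count c
      · rw [if_neg (by simpa using h1), if_pos h2]
        simp only [Bool.false_eq_true, false_iff]
        intro h
        exact absurd (h c (List.mem_cons_self ..)).2 (by omega)
      · rw [if_neg (by simpa using h1), if_neg h2, ih]
        constructor
        · rintro h x hx
          rcases List.mem_cons.mp hx with rfl | hx
          · exact ⟨h1, by omega⟩
          · exact h x hx
        · intro h x hx; exact h x (List.mem_cons_of_mem _ hx)
    · rw [if_pos (by simpa using h1)]
      simp only [Bool.false_eq_true, false_iff]
      intro h
      exact h1 (h c (List.mem_cons_self ..)).1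

theorem pvCheckB_iff (L : List Char) (w : String) :
    pvCheckB (L.foldl (fun d x => d.insert x (d.getD x 0 + 1)) PySem.Dict.empty) w = true ↔
      ∀ c ∈ L, (L.count c : Int) ≤ (w.toList.count c : Int) := by
  rw [PySem.Dict.foldl_insert_getD_add_one_eq_counter]
  simp only [pvCheckB, PySem.Dict.items_counter, List.all_eq_true, List.mem_map]
  constructor
  · intro h c hc
    have := h (c, (L.count c : Int)) ⟨c, (PySem.Set.mem_ofList L c).mpr hc, rfl⟩
    simpa using this
  · rintro h ⟨c, k⟩ ⟨x, hx, hxk⟩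
    obtain ⟨rfl, rfl⟩ := Prod.mk.injEq .. ▸ hxk
    simpa using h x ((PySem.Set.mem_ofList L x).mp hx)

theorem pvChar_filter_eq (x : Char) :
    (decide (96 < x.toNat) && decide (x.toNat ≤ 122)) = (decide ('a' ≤ x) && decide (x ≤ 'z')) := by
  have h1 : ('a' ≤ x) ↔ 97 ≤ x.toNat := by
    rw [Char.le_def, UInt32.le_iff_toNat_le]
    constructor <;> intro h <;> exact h
  have h2 : (x ≤ 'z') ↔ x.toNat ≤ 122 := by
    rw [Char.le_def, UInt32.le_iff_toNat_le]
    constructor <;> intro h <;> exact h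
  rw [Bool.eq_iff_iff]
  simp only [Bool.and_eq_true, decide_eq_true_eq, h1, h2]
  omega

-- A's predicate on the sorted letter string equals B's counter predicate
theorem pvPred_eq (licensePlate : String) (w : String) :
    pvCheckA (PySem.List.sorted (((PySem.Str.lower licensePlate).toList).filter
        (fun x => decide (96 < x.toNat) && decide (x.toNat ≤ 122))) (fun c => c))
      w.toList
      (PySem.List.sorted (((PySem.Str.lower licensePlate).toList).filter
        (fun x => decide (96 < x.toNat) && decide (x.toNat ≤ 122))) (fun c => c)) =
    pvCheckB (((((PySem.Str.lower licensePlate).toList).filter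
        (fun ch => decide ('a' ≤ ch) && decide (ch ≤ 'z')))).foldl
        (fun d x => d.insert x (d.getD x 0 + 1)) PySem.Dict.empty) w := by
  have hf : (((PySem.Str.lower licensePlate).toList).filter
        (fun ch => decide ('a' ≤ ch) && decide (ch ≤ 'z'))) =
      (((PySem.Str.lower licensePlate).toList).filter
        (fun x => decide (96 < x.toNat) && decide (x.toNat ≤ 122))) := by
    apply List.filter_congr
    intro x _
    exact (pvChar_filter_eq x).symm
  set L := (((PySem.Str.lower licensePlate).toList).filter
      (fun x => decide (96 < x.toNat) && decide (x.toNat ≤ 122))) with hL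
  rw [hf]
  have hperm : (PySem.List.sorted L (fun c => c)).Perm L := PySem.List.sorted_perm L _ false
  rw [Bool.eq_iff_iff, pvCheckA_iff, pvCheckB_iff]
  constructor
  · intro h c hc
    have hc' : c ∈ PySem.List.sorted L (fun c => c) := (PySem.List.mem_sorted ..).mpr hc
    have := (h c hc').2
    rw [hperm.count_eq] at this
    exact_mod_cast this
  · intro h c hc
    have hc' : c ∈ L := (PySem.List.mem_sorted ..).mp hc
    have hcount : (L.count c : Int) ≤ (w.toList.count c : Int) := h c hc'
    have hcount' : L.count c ≤ w.toList.count c := by exact_mod_cast hcount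
    rw [hperm.count_eq]
    refine ⟨?_, hcount'⟩
    have h1 : 1 ≤ L.count c := List.one_le_count_iff.mpr hc'
    have : c ∈ w.toList := by
      rw [← List.one_le_count_iff]; omega
    simpa [List.contains_iff_mem] using this
  
-- inserting into a length-sorted list commutes with "first strictly-shortest match"
theorem pvFind_insertBy (p : String → Bool) (x : String) (l : List String)
    (h : l.Pairwise (fun a b => PySem.Str.len a ≤ PySem.Str.len b)) :
    (PySem.List.insertBy (fun a b => decide (PySem.Str.len a < PySem.Str.len b)) x l).find? p =
      pvStepG p (l.find? p) x := by
  induction l with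
  | nil =>
    cases hp : p x <;> simp [PySem.List.insertBy, pvStepG, hp]
  | cons y t ih =>
    have hpair := (List.pairwise_cons.mp h).1
    have htail := (List.pairwise_cons.mp h).2
    simp only [PySem.List.insertBy]
    split_ifs with hlt
    · -- x goes in front: len x < len y
      have hxy : PySem.Str.len x < PySem.Str.len y := by simpa using hlt
      cases hp : p x with
      | false =>
        rw [List.find?_cons_of_neg (by simp [hp])]
        simp [pvStepG, hp]
      | true =>
        rw [List.find?_cons_of_pos hp]
        cases hfind : List.find? p (y :: t) with
        | none => simp [pvStepG, hp]
        | some z =>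
          have hz := List.mem_of_find?_eq_some hfind
          have hyz : PySem.Str.len y ≤ PySem.Str.len z := by
            rcases List.mem_cons.mp hz with rfl | hz'
            · exact le_refl _
            · exact hpair z hz'
          have hxz : PySem.Str.len x < PySem.Str.len z := by omega
          simp only [PySem.Str.len_eq, String.length_toList] at hxz
          simp [pvStepG, hp]
          intro hc
          exfalso
          omega
    · -- y stays in front: len y ≤ len x
      have hyx : ¬ PySem.Str.len x < PySem.Str.len y := by simpa using hlt
      cases hpy : p y with
      | false =>
        rw [List.find?_cons_of_neg (by simp [hpy]), List.find?_cons_of_neg (by simp [hpy])]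
        exact ih htail
      | true =>
        rw [List.find?_cons_of_pos hpy, List.find?_cons_of_pos hpy]
        cases hp : p x with
        | false => simp [pvStepG, hp]
        | true =>
          have hyx' : ¬ (x.length < y.length) := by
            simp only [PySem.Str.len_eq, String.length_toList] at hyx
            omega
          simp [pvStepG, hp, hyx']

-- "first match in the stable length-sort" = left fold keeping the first strictly-shortest match
theorem pvFind_sorted_eq_foldl (p : String → Bool) (ws : List String) :
    (PySem.List.sorted ws (fun w => PySem.Str.len w)).find? p = ws.foldl (pvStepG p) none := by
  induction ws using List.reverseRecOn with
  | nil => rfl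
  | append_singleton ws x ih =>
    have hs : PySem.List.sorted (ws ++ [x]) (fun w => PySem.Str.len w) =
        PySem.List.insertBy (fun a b => decide (PySem.Str.len a < PySem.Str.len b)) x
          (PySem.List.sorted ws (fun w => PySem.Str.len w)) := by
      rw [PySem.List.sorted_eq_foldl_insertBy, PySem.List.sorted_eq_foldl_insertBy,
        List.foldl_append]
      rfl
    rw [hs, pvFind_insertBy p x _ (PySem.List.sorted_pairwise ws _), ih, List.foldl_append]
    rfl

-- ===== VERDICT (by name: the statement is the Claim_ definition above) =====
theorem solution_448_5_spec : Claim_equal_solution_448_5 := by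
  intro licensePlate words _
  show solution_448_5 licensePlate words = solution_448_5_alt licensePlate words
  simp only [solution_448_5, solution_448_5_alt]
  rw [pvLoopA_eq_find, pvFind_sorted_eq_foldl]
  have hfun : pvStepG (fun w => pvCheckA
        (PySem.List.sorted (((PySem.Str.lower licensePlate).toList).filter
          (fun x => decide (96 < x.toNat) && decide (x.toNat ≤ 122))) (fun c => c))
        w.toList
        (PySem.List.sorted (((PySem.Str.lower licensePlate).toList).filter
          (fun x => decide (96 < x.toNat) && decide (x.toNat ≤ 122))) (fun c => c))) =
      pvBestStep ((((PySem.Str.lower licensePlate).toList).filter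
          (fun ch => decide ('a' ≤ ch) && decide (ch ≤ 'z'))).foldl
          (fun d x => d.insert x (d.getD x 0 + 1)) PySem.Dict.empty) := by
    funext b w
    simp only [pvStepG, pvBestStep, pvPred_eq licensePlate w]
  rw [hfun]
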